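-- pv_equiv track=rewrite | github.com/ndkbhm/purwadhika | jawaban3.py | ganjilGenap
-- ===== SOURCE A (Python) =====
-- def ganjilGenap(a):
--     ganjil = []
--     genap = []
--     for b in a:
--         if b % 2 == 0:
--             genap.append(b)
--         else:
--             ganjil.append(b)
--     ganjil.sort()
--     genap.sort()
--     genap.reverse()
--     return ganjil + genap
-- ===== SOURCE B (Python) =====
-- def ganjilGenap(a):
--     s = sorted(a)
--     odds = [x for x in s if x % 2 != 0]
--     evens = [x for x in reversed(s) if x % 2 == 0]
--     return odds + evens
-- ===== Notes on version B (the rewrite author's own statement) =====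
-- stated objective: alternative
-- what changed: B sorts the whole list once and then builds the odd part by filtering the sorted list and the even part by filtering its reversal, instead of partitioning first and sorting the two sublists separately.
import Mathlib
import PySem

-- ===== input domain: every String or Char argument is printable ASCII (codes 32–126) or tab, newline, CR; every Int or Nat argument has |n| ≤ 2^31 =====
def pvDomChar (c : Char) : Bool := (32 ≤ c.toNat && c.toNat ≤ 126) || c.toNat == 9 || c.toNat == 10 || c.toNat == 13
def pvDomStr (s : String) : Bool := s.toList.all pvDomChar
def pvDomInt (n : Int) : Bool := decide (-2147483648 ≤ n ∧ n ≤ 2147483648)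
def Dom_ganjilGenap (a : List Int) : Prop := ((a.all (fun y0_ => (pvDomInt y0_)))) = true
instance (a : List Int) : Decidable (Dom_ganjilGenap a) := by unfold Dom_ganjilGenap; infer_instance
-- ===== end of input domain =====

-- B sorts the whole list once, then filters odds ascending and evens from the reversed sorted list; alternative decomposition, same cost.


-- ===== PORT A =====
-- for b in a: append to genap if b % 2 == 0 else to ganjil; then sort both, reverse genap, concatenate
def ganjilGenap (a : List Int) : List Int :=
  let p := a.foldl (fun (acc : List Int × List Int) b =>
    if PySem.Int.mod b 2 == 0 then (acc.1, acc.2 ++ [b]) else (acc.1 ++ [b], acc.2)) ([], [])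
  let ganjil := PySem.List.sorted p.1 (fun x => x) false
  let genap := (PySem.List.sorted p.2 (fun x => x) false).reverse
  ganjil ++ genap

-- ===== PORT B =====
def ganjilGenap_alt (a : List Int) : List Int :=
  let s := PySem.List.sorted a (fun x => x) false
  let odds := s.filter (fun x => !(PySem.Int.mod x 2 == 0))
  let evens := s.reverse.filter (fun x => PySem.Int.mod x 2 == 0)
  odds ++ evens

-- ===== PRECONDITION & SPEC =====
def Spec_ganjilGenap (a : List Int) (out : List Int) : Prop := out = ganjilGenap_alt a
instance (a : List Int) (out : List Int) : Decidable (Spec_ganjilGenap a out) := by unfold Spec_ganjilGenap; infer_instance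

-- ===== CLAIM (what is proved, stated in full; the proofs are below) =====
def Claim_equal_ganjilGenap : Prop := ∀ (a : List Int), Dom_ganjilGenap a → Spec_ganjilGenap a (ganjilGenap a)

-- ===== LEMMAS AND PROOFS =====

-- A's accumulating fold is the two filters of the input
theorem ganjilGenap_fold_eq (a : List Int) (g1 g2 : List Int) :
    a.foldl (fun (acc : List Int × List Int) b =>
      if PySem.Int.mod b 2 == 0 then (acc.1, acc.2 ++ [b]) else (acc.1 ++ [b], acc.2)) (g1, g2)
    = (g1 ++ a.filter (fun x => !(PySem.Int.mod x 2 == 0)),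
       g2 ++ a.filter (fun x => PySem.Int.mod x 2 == 0)) := by
  induction a generalizing g1 g2 with
  | nil => simp
  | cons b t ih =>
    simp only [List.foldl_cons, List.filter_cons]
    cases h : (PySem.Int.mod b 2 == 0) <;>
      simp only [h, Bool.not_false, Bool.not_true, Bool.false_eq_true, if_true, if_false,
        ih, List.append_assoc, List.singleton_append]

-- sorting a filtered list = filtering the sorted list
theorem sorted_filter_comm (a : List Int) (p : Int → Bool) :
    PySem.List.sorted (a.filter p) (fun x => x) false
    = (PySem.List.sorted a (fun x => x) false).filter p := by
  apply PySem.List.sorted_id_eq_of_perm_of_pairwise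
  · exact ((PySem.List.sorted_perm a (fun x => x) false).filter p)
  · exact (PySem.List.sorted_pairwise a (fun x => x)).filter p

-- ===== VERDICT (by name: the statement is the Claim_ definition above) =====
theorem ganjilGenap_spec : Claim_equal_ganjilGenap := by
  intro a _
  show ganjilGenap a = ganjilGenap_alt a
  unfold ganjilGenap ganjilGenap_alt
  simp only [ganjilGenap_fold_eq, List.nil_append]
  rw [sorted_filter_comm, sorted_filter_comm, List.filter_reverse]
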